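-- pv_equiv track=rewrite | github.com/ak2k2/Connect-Four-Alpha-Beta-AI | fours.py | in_a_row_met
-- ===== SOURCE A (Python) =====
-- IN_A_ROW = 4
--
-- def in_a_row_met(arr: list):
--     streakR = 0
--     streakY = 0
--     for p in arr:
--         if p == -1:
--             streakY = 0
--             streakR += 1
--             if streakR == IN_A_ROW:
--                 return -1  # Red wins
--         elif p == 1:
--             streakR = 0
--             streakY += 1
--             if streakY == IN_A_ROW:
--                 return 1  # Yellow wins
--         else:
--             streakR, streakY = 0, 0
--     return 0  # No one wins
-- ===== SOURCE B (Python) =====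
-- IN_A_ROW = 4
--
-- def in_a_row_met(arr: list):
--     # Scan run by run: find the extent of each run of equal values,
--     # report its value if it is a player (-1 or 1) with a run of >= IN_A_ROW.
--     rest = list(arr)
--     while rest:
--         head = rest[0]
--         k = 1
--         while k < len(rest) and rest[k] == head:
--             k += 1
--         if (head == -1 or head == 1) and k >= IN_A_ROW:
--             return head
--         rest = rest[k:]
--     return 0
-- ===== Notes on version B (the rewrite author's own statement) =====
-- stated objective: alternative
-- what changed: Replaces the two interleaved per-element streak counters with a run-length scan: each maximal run of equal values is found as a whole and judged once (value in {-1,1} and length >= 4), instead of counting element by element with resets.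
import Mathlib
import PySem

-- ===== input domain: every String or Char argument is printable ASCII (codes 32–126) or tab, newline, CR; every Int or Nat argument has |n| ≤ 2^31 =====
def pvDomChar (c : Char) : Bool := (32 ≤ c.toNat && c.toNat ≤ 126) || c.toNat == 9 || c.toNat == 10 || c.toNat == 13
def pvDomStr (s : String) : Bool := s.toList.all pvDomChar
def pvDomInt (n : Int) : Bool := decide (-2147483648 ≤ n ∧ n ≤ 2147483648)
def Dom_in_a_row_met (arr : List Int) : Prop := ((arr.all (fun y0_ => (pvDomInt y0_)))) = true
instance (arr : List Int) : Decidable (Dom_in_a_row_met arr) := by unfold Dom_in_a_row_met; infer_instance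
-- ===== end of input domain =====

-- B replaces A's two interleaved streak counters with a run-length scan (alternative decomposition; same cost).

-- ===== PORT A =====
def pvIN_A_ROW : Int := 4

-- the for-loop of A, carrying (streakR, streakY); 'streakY = 0; streakR += 1; test' is inlined
def pvLoopA : List Int → Int → Int → Int
  | [], _, _ => 0
  | p :: rest, streakR, streakY =>
    if p = -1 then
      if streakR + 1 = pvIN_A_ROW then -1 else pvLoopA rest (streakR + 1) 0
    else if p = 1 then
      if streakY + 1 = pvIN_A_ROW then 1 else pvLoopA rest 0 (streakY + 1)
    else pvLoopA rest 0 0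

def in_a_row_met (arr : List Int) : Int := pvLoopA arr 0 0

-- ===== PORT B =====
-- Source B's outer while-loop: take the head's whole run (inner while = takeWhile),
-- judge it, then continue on the remainder (rest = rest[k:] = dropWhile).
def in_a_row_met_alt : List Int → Int
  | [] => 0
  | head :: rest =>
    let run := rest.takeWhile (fun x => x = head)
    if (head = -1 ∨ head = 1) ∧ 4 ≤ 1 + run.length then head
    else in_a_row_met_alt (rest.dropWhile (fun x => x = head))
termination_by l => l.length
decreasing_by
  simp only [List.length_cons]
  exact Nat.lt_succ_of_le (List.length_dropWhile_le _ _)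

-- ===== PRECONDITION & SPEC =====
def Spec_in_a_row_met (arr : List Int) (out : Int) : Prop := out = in_a_row_met_alt arr
instance (arr : List Int) (out : Int) : Decidable (Spec_in_a_row_met arr out) := by unfold Spec_in_a_row_met; infer_instance

-- ===== CLAIM (what is proved, stated in full; the proofs are below) =====
def Claim_equal_in_a_row_met : Prop := ∀ (arr : List Int), Dom_in_a_row_met arr → Spec_in_a_row_met arr (in_a_row_met arr)

-- ===== LEMMAS AND PROOFS =====

lemma alt_nil : in_a_row_met_alt [] = 0 := by
  rw [in_a_row_met_alt]

lemma alt_cons (p : Int) (rest : List Int) :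
    in_a_row_met_alt (p :: rest) =
      if (p = -1 ∨ p = 1) ∧ 4 ≤ 1 + (rest.takeWhile (fun x => x = p)).length then p
      else in_a_row_met_alt (rest.dropWhile (fun x => x = p)) := by
  rw [in_a_row_met_alt]

-- a run of 4 equal player values at the front decides the game for B
lemma alt_four (v : Int) (rest : List Int) (hv : v = -1 ∨ v = 1) :
    in_a_row_met_alt (v :: v :: v :: v :: rest) = v := by
  rw [alt_cons]
  rw [if_pos]
  refine ⟨hv, ?_⟩
  simp [List.takeWhile]
  omega

-- a short (< 4) run of v followed by p ≠ v is skipped wholesale by B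
lemma alt_skip (v p : Int) (rest : List Int) (k : Nat) (hk : k < 4) (hp : p ≠ v) :
    in_a_row_met_alt (List.replicate k v ++ p :: rest) = in_a_row_met_alt (p :: rest) := by
  interval_cases k
  · rfl
  all_goals
    simp only [List.replicate, List.cons_append, List.nil_append]
    rw [alt_cons]
    simp [List.takeWhile, List.dropWhile, hp]

-- a short (< 4) run alone yields 0 for B
lemma alt_rep (v : Int) (k : Nat) (hk : k < 4) :
    in_a_row_met_alt (List.replicate k v) = 0 := by
  interval_cases k
  · simp only [List.replicate]; exact alt_nil
  all_goals
    simp only [List.replicate]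
    rw [alt_cons]
    simp [List.takeWhile, List.dropWhile, alt_nil]

-- a non-player run is irrelevant: B skips it, and skipping nothing changes nothing
lemma alt_junk (p : Int) (l : List Int) (h1 : p ≠ -1) (h2 : p ≠ 1) :
    in_a_row_met_alt (p :: l) = in_a_row_met_alt l := by
  have hcond : ¬ ((p = -1 ∨ p = 1) ∧ 4 ≤ 1 + (l.takeWhile (fun x => x = p)).length) := by
    rintro ⟨h, -⟩
    rcases h with h | h
    · exact h1 h
    · exact h2 h
  rw [alt_cons, if_neg hcond]
  -- alt (dropWhile (=p) l) = alt l : only the head of l can start with p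
  cases l with
  | nil => rfl
  | cons q l' =>
    by_cases hq : q = p
    · subst hq
      have hcond' : ¬ ((q = -1 ∨ q = 1) ∧ 4 ≤ 1 + (l'.takeWhile (fun x => x = q)).length) := by
        rintro ⟨h, -⟩
        rcases h with h | h
        · exact h1 h
        · exact h2 h
      rw [alt_cons (p := q), if_neg hcond']
      simp [List.dropWhile]
    · simp [List.dropWhile, hq]

-- main invariant: A's loop in state (k,0) resp. (0,k) computes what B computes on
-- the pending replicate-prefixed list
lemma key (arr : List Int) :
    (∀ k : Nat, k < 4 →
      pvLoopA arr (k : Int) 0 = in_a_row_met_alt (List.replicate k (-1) ++ arr)) ∧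
    (∀ k : Nat, k < 4 →
      pvLoopA arr 0 (k : Int) = in_a_row_met_alt (List.replicate k 1 ++ arr)) := by
  induction arr with
  | nil =>
    constructor <;> intro k hk <;>
      simp only [pvLoopA, List.append_nil] <;> exact (alt_rep _ k hk).symm
  | cons p rest ih =>
    constructor <;> intro k hk
    · -- state (k, 0): pending run of k reds
      by_cases h1 : p = -1
      · subst h1
        rw [pvLoopA, if_pos rfl]
        by_cases h4 : k = 3
        · subst h4
          rw [if_pos (by norm_num [pvIN_A_ROW])]
          simp only [List.replicate, List.cons_append, List.nil_append]
          exact (alt_four (-1) rest (Or.inl rfl)).symm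
        · rw [if_neg (by simp only [pvIN_A_ROW]; omega)]
          have h := ih.1 (k + 1) (by omega)
          push_cast at h
          rw [h]
          congr 1
          rw [List.replicate_succ']
          simp
      · by_cases h2 : p = 1
        · subst h2
          rw [pvLoopA, if_neg (by decide), if_pos rfl,
            if_neg (by norm_num [pvIN_A_ROW])]
          have h := ih.2 1 (by omega)
          simp only [List.replicate, List.singleton_append, Nat.cast_one] at h
          rw [show (0 : Int) + 1 = 1 by norm_num, h]
          exact (alt_skip (-1) 1 rest k hk (by decide)).symm
        · rw [pvLoopA, if_neg h1, if_neg h2]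
          have h0 := ih.1 0 (by omega)
          simp only [List.replicate, List.nil_append, Nat.cast_zero] at h0
          rw [h0, alt_skip (-1) p rest k hk h1, alt_junk p rest h1 h2]
    · -- state (0, k): pending run of k yellows
      by_cases h2 : p = 1
      · subst h2
        rw [pvLoopA, if_neg (by decide), if_pos rfl]
        by_cases h4 : k = 3
        · subst h4
          rw [if_pos (by norm_num [pvIN_A_ROW])]
          simp only [List.replicate, List.cons_append, List.nil_append]
          exact (alt_four 1 rest (Or.inr rfl)).symm
        · rw [if_neg (by simp only [pvIN_A_ROW]; omega)]
          have h := ih.2 (k + 1) (by omega)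
          push_cast at h
          rw [h]
          congr 1
          rw [List.replicate_succ']
          simp
      · by_cases h1 : p = -1
        · subst h1
          rw [pvLoopA, if_pos rfl, if_neg (by norm_num [pvIN_A_ROW])]
          have h := ih.1 1 (by omega)
          simp only [List.replicate, List.singleton_append, Nat.cast_one] at h
          rw [show (0 : Int) + 1 = 1 by norm_num, h]
          exact (alt_skip 1 (-1) rest k hk (by decide)).symm
        · rw [pvLoopA, if_neg h1, if_neg h2]
          have h0 := ih.1 0 (by omega)
          simp only [List.replicate, List.nil_append, Nat.cast_zero] at h0
          rw [h0, alt_skip 1 p rest k hk h2, alt_junk p rest h1 h2]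

-- ===== VERDICT (by name: the statement is the Claim_ definition above) =====
theorem in_a_row_met_spec : Claim_equal_in_a_row_met := by
  intro arr _
  unfold Spec_in_a_row_met in_a_row_met
  have h := (key arr).1 0 (by omega)
  simpa using h
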